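-- pv_equiv track=rewrite | github.com/aleskucera/axion | plot_contacts.py | _group_contact_columns
-- ===== SOURCE A (Python) =====
-- from collections import defaultdict
--
-- def _group_contact_columns(columns):
--     """Group column names by contact quantity (contact_depth, contact_normal, contact_point_0, etc.)."""
--     groups = defaultdict(list)
--     for col in columns:
--         if col == "step":
--             continue
--         if col.startswith("contact_point_0_"):
--             groups["contact_point_0"].append(col)
--         elif col.startswith("contact_point_1_"):
--             groups["contact_point_1"].append(col)
--         else:
--             # contact_depth_0, contact_normal_0, contact_thickness_0, contact_mask_0
--             base = col.rsplit("_", 1)[0]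
--             groups[base].append(col)
--     # Sort columns within each group by numeric suffix
--     def sort_key(c):
--         try:
--             return int(c.split("_")[-1])
--         except ValueError:
--             return 0
--
--     for key in groups:
--         groups[key].sort(key=sort_key)
--     return dict(groups)
-- ===== SOURCE B (Python) =====
-- def _group_contact_columns(columns):
--     """Group column names by contact quantity (contact_depth, contact_normal, contact_point_0, etc.)."""
--     def base_of(c):
--         if c.startswith("contact_point_0_"):
--             return "contact_point_0"
--         if c.startswith("contact_point_1_"):
--             return "contact_point_1"
--         return c.rsplit("_", 1)[0]
--
--     def sort_key(c):
--         try: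
--             return int(c.split("_")[-1])
--         except ValueError:
--             return 0
--
--     cols = [c for c in columns if c != "step"]
--     bases = list(dict.fromkeys(base_of(c) for c in cols))
--     return {b: sorted((c for c in cols if base_of(c) == b), key=sort_key)
--             for b in bases}
-- ===== Notes on version B (the rewrite author's own statement) =====
-- stated objective: simpler
-- what changed: A builds a defaultdict in one pass appending each column to its base's bucket and then sorts every bucket in place; B instead computes the ordered set of distinct bases once and builds the result dict directly by a per-base filter of the non-'step' columns plus one sorted() call, with no mutable dict accumulation.
import Mathlib
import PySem

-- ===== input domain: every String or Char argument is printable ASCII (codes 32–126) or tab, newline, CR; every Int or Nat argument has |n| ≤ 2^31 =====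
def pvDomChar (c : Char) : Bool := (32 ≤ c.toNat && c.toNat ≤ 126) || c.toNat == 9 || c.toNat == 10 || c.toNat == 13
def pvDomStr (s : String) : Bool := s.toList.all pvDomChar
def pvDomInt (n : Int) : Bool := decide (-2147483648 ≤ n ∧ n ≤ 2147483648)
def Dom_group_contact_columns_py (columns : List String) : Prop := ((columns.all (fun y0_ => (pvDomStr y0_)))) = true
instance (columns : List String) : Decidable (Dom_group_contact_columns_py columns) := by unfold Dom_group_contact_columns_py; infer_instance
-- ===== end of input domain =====

-- B replaces A's mutable defaultdict accumulation + per-bucket in-place sorts by a direct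
-- "ordered distinct bases, then filter + one sorted() per base" construction (objective: simpler).


-- ===== PORT A =====
-- shared primitive: c.rsplit("_", 1)[0] — everything before the LAST '_', the whole string when
-- there is none (exact: rfind gives the highest index of '_', slice to it; -1 means absent)
def pvRsplitHead (c : String) : String :=
  let i := PySem.Str.rfind c "_"
  if i = -1 then c else PySem.Str.slice c none (some i)

-- shared helper sort_key (both Pythons contain the identical helper):
-- int(c.split("_")[-1]), ValueError -> 0 (PySem.Int.ofStr? is none exactly on ValueError)
def pvSortKey (c : String) : Int :=
  match PySem.Str.split? c "_" with
  | none => 0   -- unreachable: the separator "_" is nonempty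
  | some parts => (PySem.Int.ofStr? (PySem.List.pyGetD parts (-1) "")).getD 0

def group_contact_columns_py (columns : List String) : List (String × List String) :=
  let groups : PySem.Dict String (List String) :=
    columns.foldl (fun groups col =>
      if col == "step" then groups
      else if PySem.Str.startswith col "contact_point_0_" then
        groups.modify "contact_point_0" [] (· ++ [col])
      else if PySem.Str.startswith col "contact_point_1_" then
        groups.modify "contact_point_1" [] (· ++ [col])
      else
        groups.modify (pvRsplitHead col) [] (· ++ [col])) PySem.Dict.empty
  -- for key in groups: groups[key].sort(key=sort_key); return dict(groups)
  groups.items.map (fun p => (p.1, PySem.List.sorted p.2 pvSortKey false))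

-- ===== PORT B =====
def pvBaseOf (c : String) : String :=
  if PySem.Str.startswith c "contact_point_0_" then "contact_point_0"
  else if PySem.Str.startswith c "contact_point_1_" then "contact_point_1"
  else pvRsplitHead c

def group_contact_columns_py_alt (columns : List String) : List (String × List String) :=
  let cols := columns.filter (fun c => !(c == "step"))
  let bases := PySem.List.dedup (cols.map pvBaseOf)   -- list(dict.fromkeys(...))
  bases.map (fun b =>
    (b, PySem.List.sorted (cols.filter (fun c => pvBaseOf c == b)) pvSortKey false))

-- ===== PRECONDITION & SPEC =====
def Spec_group_contact_columns_py (columns : List String) (out : List (String × List String)) : Prop := out = group_contact_columns_py_alt columns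
instance (columns : List String) (out : List (String × List String)) : Decidable (Spec_group_contact_columns_py columns out) := by unfold Spec_group_contact_columns_py; infer_instance

-- ===== CLAIM (what is proved, stated in full; the proofs are below) =====
def Claim_equal_group_contact_columns_py : Prop := ∀ (columns : List String), Dom_group_contact_columns_py columns → Spec_group_contact_columns_py columns (group_contact_columns_py columns)

-- ===== LEMMAS AND PROOFS =====

-- A's loop body on a non-"step" column is a modify keyed by pvBaseOf
theorem pvBody_eq (d : PySem.Dict String (List String)) (c : String) :
    (if PySem.Str.startswith c "contact_point_0_" then
       d.modify "contact_point_0" [] (· ++ [c])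
     else if PySem.Str.startswith c "contact_point_1_" then
       d.modify "contact_point_1" [] (· ++ [c])
     else d.modify (pvRsplitHead c) [] (· ++ [c]))
    = d.modify (pvBaseOf c) [] (· ++ [c]) := by
  unfold pvBaseOf
  split_ifs <;> rfl

-- A's accumulation loop, with the step-skip expressed as a filter and the branch chain as pvBaseOf
theorem pvFoldl_eq_filter_foldl (cols : List String) (d : PySem.Dict String (List String)) :
    cols.foldl (fun groups col =>
      if col == "step" then groups
      else if PySem.Str.startswith col "contact_point_0_" then
        groups.modify "contact_point_0" [] (· ++ [col])
      else if PySem.Str.startswith col "contact_point_1_" then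
        groups.modify "contact_point_1" [] (· ++ [col])
      else
        groups.modify (pvRsplitHead col) [] (· ++ [col])) d
    = (cols.filter (fun c => !(c == "step"))).foldl
        (fun groups col => groups.modify (pvBaseOf col) [] (· ++ [col])) d := by
  induction cols generalizing d with
  | nil => rfl
  | cons c cs ih =>
    rw [List.foldl_cons, List.filter_cons]
    by_cases hc : (c == "step") = true
    · rw [if_pos hc, hc]
      exact ih d
    · rw [Bool.not_eq_true] at hc
      rw [if_neg (by simp [hc]), hc, pvBody_eq d c]
      simp only [Bool.not_false, if_true, List.foldl_cons]
      exact ih _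

theorem group_contact_columns_py_spec' (columns : List String) :
    group_contact_columns_py columns = group_contact_columns_py_alt columns := by
  unfold group_contact_columns_py group_contact_columns_py_alt
  dsimp only
  rw [pvFoldl_eq_filter_foldl]
  set cols := columns.filter (fun c => !(c == "step")) with hcols
  set D := cols.foldl (fun groups col => groups.modify (pvBaseOf col) [] (· ++ [col]))
      PySem.Dict.empty with hD
  have hmap : D = (cols.map (fun c => (pvBaseOf c, c))).foldl
      (fun d p => d.modify p.1 [] (· ++ [p.2])) PySem.Dict.empty := by
    rw [hD, List.foldl_map]
  have hkeys : D.keys = PySem.Set.ofList (cols.map pvBaseOf) := by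
    rw [hD]
    exact PySem.Dict.keys_foldl_modify_key cols pvBaseOf [] (fun _ col => (· ++ [col]))
      PySem.Dict.empty
  have hnd : D.keys.Nodup := by
    rw [hD]
    exact PySem.Dict.nodup_keys_foldl_modify_key cols pvBaseOf [] (fun _ col => (· ++ [col]))
      PySem.Dict.empty List.nodup_nil
  have hgetD : ∀ k, D.getD k [] = cols.filter (fun c => pvBaseOf c == k) := by
    intro k
    rw [hmap, PySem.Dict.getD_foldl_modify_append]
    have h1 : (List.filter (fun p => p.1 == k) (cols.map (fun c => (pvBaseOf c, c))))
        = (cols.filter (fun c => pvBaseOf c == k)).map (fun c => (pvBaseOf c, c)) :=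
      List.filter_map
    rw [h1, List.map_map]
    simp [PySem.Dict.getD, PySem.Dict.get?, PySem.Dict.empty, Function.comp_def]
  rw [PySem.Dict.items_eq_map_keys D hnd [], hkeys, List.map_map,
    PySem.List.dedup_eq_ofList]
  refine List.map_congr_left ?_
  intro k _
  simp [hgetD k]

-- ===== VERDICT (by name: the statement is the Claim_ definition above) =====
theorem group_contact_columns_py_spec : Claim_equal_group_contact_columns_py := by
  intro columns _
  exact group_contact_columns_py_spec' columns
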